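-- pv_equiv track=rewrite | github.com/boykoreid/Legends-Season-Sim | legends_season_sim.py | goals_per_game
-- ===== SOURCE A (Python) =====
-- def goals_per_game(team_goals_per_player):
--     total_goals_season = []
--     for game in range(len(team_goals_per_player[0])):
--         team_goals_per_game = []  # List to hold the team's goals for that game
--         for player in range(len(team_goals_per_player)):
--             team_goals_per_game.append(team_goals_per_player[player][game])
--         goals_per_game = sum(team_goals_per_game)
--         total_goals_season.append(goals_per_game)
--     goals_for = sum(total_goals_season)
--
--     # - total_goals_season is a list, which should be the length of the season, with each value being the total goals scored by the team in that game
--     # - goals_for is the total number of goals scored by the team in the season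
--     return total_goals_season, goals_for
-- ===== SOURCE B (Python) =====
-- def goals_per_game(team_goals_per_player):
--     n_games = len(team_goals_per_player[0])
--     total_goals_season = [0] * n_games
--     for player in team_goals_per_player:
--         total_goals_season = [total_goals_season[g] + player[g] for g in range(n_games)]
--     goals_for = sum(total_goals_season)
--     return total_goals_season, goals_for
-- ===== Notes on version B (the rewrite author's own statement) =====
-- stated objective: alternative
-- what changed: Single row-major pass keeping a running per-game totals vector, instead of extracting and summing one column list per game with nested game/player index loops; avoids building a column list per game (better locality, fewer temporary lists).
import Mathlib
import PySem

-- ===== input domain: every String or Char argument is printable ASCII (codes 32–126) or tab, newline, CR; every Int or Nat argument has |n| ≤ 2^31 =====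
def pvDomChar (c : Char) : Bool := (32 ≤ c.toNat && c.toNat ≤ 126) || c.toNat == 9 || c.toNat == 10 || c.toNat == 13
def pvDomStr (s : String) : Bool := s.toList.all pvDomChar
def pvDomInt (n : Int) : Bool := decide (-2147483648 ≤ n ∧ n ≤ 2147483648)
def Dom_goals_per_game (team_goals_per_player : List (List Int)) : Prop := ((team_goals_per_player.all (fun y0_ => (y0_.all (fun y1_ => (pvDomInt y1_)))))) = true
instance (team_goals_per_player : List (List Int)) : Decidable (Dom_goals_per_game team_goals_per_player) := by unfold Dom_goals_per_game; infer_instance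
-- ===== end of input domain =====

-- B replaces A's column-extraction (outer loop over games, inner list build per game)
-- by a single row-major pass maintaining a running per-game totals vector (objective: alternative).


-- ===== PORT A =====
-- outer loop over games builds a per-game column list, sums it, appends; then a grand total.
-- (indexing is total via getD; Pre_ restricts to inputs where Python's indexing succeeds)
def goals_per_game (team_goals_per_player : List (List Int)) : List Int × Int :=
  let n := (team_goals_per_player.headD []).length
  let total_goals_season :=
    (List.range n).foldl (fun acc game =>
      let team_goals_per_game :=
        (List.range team_goals_per_player.length).foldl
          (fun c player => c ++ [(team_goals_per_player.getD player []).getD game 0]) []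
      acc ++ [team_goals_per_game.foldl (· + ·) 0]) []
  (total_goals_season, total_goals_season.foldl (· + ·) 0)

-- ===== PORT B =====
-- one pass over the rows, rebuilding the running totals vector element-wise.
def goals_per_game_alt (team_goals_per_player : List (List Int)) : List Int × Int :=
  let n := (team_goals_per_player.headD []).length
  let total_goals_season :=
    team_goals_per_player.foldl
      (fun tot player => (List.range n).map (fun g => tot.getD g 0 + player.getD g 0))
      (List.replicate n 0)
  (total_goals_season, total_goals_season.foldl (· + ·) 0)

-- ===== PRECONDITION & SPEC =====
-- Pre_ excludes exactly the inputs where Python A raises IndexError: the empty list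
-- (team_goals_per_player[0]) and ragged inputs where some row is shorter than row 0.
def Pre_goals_per_game (team_goals_per_player : List (List Int)) : Prop :=
  team_goals_per_player ≠ [] ∧
  ∀ row ∈ team_goals_per_player, (team_goals_per_player.headD []).length ≤ row.length
instance (team_goals_per_player : List (List Int)) : Decidable (Pre_goals_per_game team_goals_per_player) := by unfold Pre_goals_per_game; infer_instance

def pvWitness_goals_per_game : List (List Int) := [[1, 2, 3], [0, 4, 1]]

def Spec_goals_per_game (team_goals_per_player : List (List Int)) (out : List Int × Int) : Prop := out = goals_per_game_alt team_goals_per_player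
instance (team_goals_per_player : List (List Int)) (out : List Int × Int) : Decidable (Spec_goals_per_game team_goals_per_player out) := by unfold Spec_goals_per_game; infer_instance

-- ===== CLAIM (what is proved, stated in full; the proofs are below) =====
def Claim_equal_goals_per_game : Prop := ∀ (team_goals_per_player : List (List Int)), Dom_goals_per_game team_goals_per_player → Pre_goals_per_game team_goals_per_player → Spec_goals_per_game team_goals_per_player (goals_per_game team_goals_per_player)

-- ===== LEMMAS AND PROOFS =====

-- append-fold builds the map
theorem pv_foldl_append_map {α β : Type} (f : α → β) :
    ∀ (l : List α) (acc : List β),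
      l.foldl (fun c x => c ++ [f x]) acc = acc ++ l.map f := by
  intro l
  induction l with
  | nil => simp
  | cons x xs ih => intro acc; simp [List.foldl, ih]

-- shifting the initial accumulator out of an additive fold
theorem pv_foldl_add_init {α : Type} (f : α → Int) :
    ∀ (l : List α) (c : Int),
      l.foldl (fun a x => a + f x) c = c + l.foldl (fun a x => a + f x) 0 := by
  intro l
  induction l with
  | nil => simp
  | cons x xs ih =>
    intro c
    simp only [List.foldl]
    rw [ih (c + f x), ih (0 + f x)]
    ring

-- indexing fold over range of the length is just mapping over the list
theorem pv_range_getD_map (xs : List (List Int)) (g : ℕ) :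
    (List.range xs.length).map (fun p => (xs.getD p []).getD g 0)
      = xs.map (fun row => row.getD g 0) := by
  apply List.ext_getElem
  · simp
  · intro i h1 h2
    simp only [List.getElem_map, List.getElem_range]
    congr 1
    rw [List.getD_eq_getElem?_getD]
    simp [List.getElem?_eq_getElem (by simpa using h2)]

-- B's streaming fold computes the per-game column sums
theorem pv_alt_fold (n : ℕ) :
    ∀ (xs : List (List Int)) (h : ℕ → Int),
      xs.foldl (fun tot player => (List.range n).map (fun g => tot.getD g 0 + player.getD g 0))
        ((List.range n).map h)
      = (List.range n).map
          (fun g => h g + xs.foldl (fun a row => a + row.getD g 0) 0) := by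
  intro xs
  induction xs with
  | nil => intro h; simp
  | cons row rest ih =>
    intro h
    simp only [List.foldl]
    have hstep : (List.range n).map
        (fun g => ((List.range n).map h).getD g 0 + row.getD g 0)
        = (List.range n).map (fun g => h g + row.getD g 0) := by
      apply List.map_congr_left
      intro g hg
      have hg' : g < n := List.mem_range.mp hg
      congr 1
      rw [List.getD_eq_getElem?_getD]
      simp [hg']
    rw [hstep, ih (fun g => h g + row.getD g 0)]
    apply List.map_congr_left
    intro g _
    rw [pv_foldl_add_init (fun row : List Int => row.getD g 0) rest (0 + row.getD g 0)]
    ring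

-- ===== VERDICT (by name: the statement is the Claim_ definition above) =====
theorem goals_per_game_spec : Claim_equal_goals_per_game := by
  intro xs _ _
  show goals_per_game xs = goals_per_game_alt xs
  have hlist :
      (List.range (xs.headD []).length).foldl (fun acc game =>
          acc ++ [((List.range xs.length).foldl
            (fun c player => c ++ [(xs.getD player []).getD game 0]) []).foldl (· + ·) 0]) []
      = xs.foldl
          (fun tot player =>
            (List.range (xs.headD []).length).map (fun g => tot.getD g 0 + player.getD g 0))
          (List.replicate (xs.headD []).length 0) := by
    have hrepl : (List.replicate (xs.headD []).length (0 : Int))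
        = (List.range (xs.headD []).length).map (fun _ => (0 : Int)) := by
      simp [List.map_const']
    rw [hrepl, pv_alt_fold (xs.headD []).length xs (fun _ => 0)]
    rw [pv_foldl_append_map
      (fun game => ((List.range xs.length).foldl
        (fun c player => c ++ [(xs.getD player []).getD game 0]) []).foldl (· + ·) 0)
      (List.range (xs.headD []).length) []]
    simp only [List.nil_append]
    apply List.map_congr_left
    intro g _
    rw [pv_foldl_append_map (fun p => (xs.getD p []).getD g 0) (List.range xs.length) []]
    simp only [List.nil_append, pv_range_getD_map, List.foldl_map]
    simp
  show ((List.range (xs.headD []).length).foldl (fun acc game =>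
          acc ++ [((List.range xs.length).foldl
            (fun c player => c ++ [(xs.getD player []).getD game 0]) []).foldl (· + ·) 0]) [],
        ((List.range (xs.headD []).length).foldl (fun acc game =>
          acc ++ [((List.range xs.length).foldl
            (fun c player => c ++ [(xs.getD player []).getD game 0]) []).foldl (· + ·) 0]) []).foldl (· + ·) 0)
      = (xs.foldl (fun tot player =>
            (List.range (xs.headD []).length).map (fun g => tot.getD g 0 + player.getD g 0))
          (List.replicate (xs.headD []).length 0),
        (xs.foldl (fun tot player =>
            (List.range (xs.headD []).length).map (fun g => tot.getD g 0 + player.getD g 0))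
          (List.replicate (xs.headD []).length 0)).foldl (· + ·) 0)
  rw [hlist]
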